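-- pv_equiv track=rewrite | github.com/urogers/CircuiTikZ_Designer_to_JSON | tikz_tokens_2_json.py | split_options
-- ===== SOURCE A (Python) =====
-- def split_options(s):
--     '''
--     Remove the outer brackets [] if present, and then split the comma deliminated information, excluding any comma's
--     in LaTeX math blocks.
--
--     Example: '[american voltage source, l_={$e(t), a(t)$}]'  --> ['american voltage source', 'l_={$e(t), a(t)$}']
--
--     :param s:   Input string, similar to the example above
--     :return: parts    Comma deliminated list of options
--     '''
--
--     if s.startswith('[') and s.endswith(']'):
--         s = s[1:-1]
--
--     parts = []
--     current = []
--     depth_brace = 0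
--     in_dollar = False
--     escape = False
--
--     for char in s:
--         if escape:
--             current.append(char)
--             escape = False
--             continue
--
--         if char == '\\':
--             current.append(char)
--             escape = True
--             continue
--
--         if char == '$':
--             in_dollar = not in_dollar
--             current.append(char)
--             continue
--
--         if not in_dollar:
--             if char == '{':
--                 depth_brace += 1
--             elif char == '}':
--                 depth_brace -= 1
--
--         # Split only on commas at top level
--         if char == ',' and depth_brace == 0 and not in_dollar:
--             parts.append(''.join(current).strip())
--             current = []
--         else:
--             current.append(char)
--
--     # add last part
--     if current:
--         parts.append(''.join(current).strip())
--
--     return parts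
-- ===== SOURCE B (Python) =====
-- def split_options(s):
--     # Two-pass: first collect the indices of top-level commas, then slice.
--     if s.startswith('[') and s.endswith(']'):
--         s = s[1:-1]
--     cuts = []
--     depth = 0
--     in_dollar = False
--     escape = False
--     for i, ch in enumerate(s):
--         if escape:
--             escape = False
--         elif ch == '\\':
--             escape = True
--         elif ch == '$':
--             in_dollar = not in_dollar
--         elif not in_dollar:
--             if ch == '{':
--                 depth += 1
--             elif ch == '}':
--                 depth -= 1
--             elif ch == ',' and depth == 0:
--                 cuts.append(i)
--     parts = []
--     start = 0
--     for i in cuts: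
--         parts.append(s[start:i].strip())
--         start = i + 1
--     tail = s[start:]
--     if tail:
--         parts.append(tail.strip())
--     return parts
-- ===== Notes on version B (the rewrite author's own statement) =====
-- stated objective: alternative
-- what changed: B replaces A's single accumulate-characters pass with two passes: one scan that only records the indices of top-level commas, then slicing the string between consecutive indices (dropping an empty trailing slice), instead of building each segment character by character.
import Mathlib
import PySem

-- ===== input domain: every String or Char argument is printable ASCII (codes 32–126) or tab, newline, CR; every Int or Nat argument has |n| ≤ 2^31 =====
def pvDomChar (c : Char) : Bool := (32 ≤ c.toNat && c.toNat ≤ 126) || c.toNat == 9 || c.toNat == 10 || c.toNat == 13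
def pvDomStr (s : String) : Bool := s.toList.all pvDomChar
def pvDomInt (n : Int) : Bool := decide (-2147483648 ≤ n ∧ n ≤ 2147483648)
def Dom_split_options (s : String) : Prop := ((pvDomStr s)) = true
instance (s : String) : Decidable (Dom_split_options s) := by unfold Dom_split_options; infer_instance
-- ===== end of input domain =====

-- B re-implements the split as two passes (collect top-level comma indices, then slice); objective: alternative decomposition, same behaviour.

-- ===== PORT A =====
-- A's loop state: (parts, current, depth_brace, in_dollar, escape)
def pvAStep (st : List (List Char) × List Char × Int × Bool × Bool) (c : Char) :
    List (List Char) × List Char × Int × Bool × Bool :=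
  let parts := st.1; let current := st.2.1; let depth := st.2.2.1
  let dollar := st.2.2.2.1; let escape := st.2.2.2.2
  if escape then (parts, current ++ [c], depth, dollar, false)
  else if c = '\\' then (parts, current ++ [c], depth, dollar, true)
  else if c = '$' then (parts, current ++ [c], depth, !dollar, escape)
  else
    let depth' := if !dollar && c = '{' then depth + 1
                  else if !dollar && c = '}' then depth - 1 else depth
    if c = ',' ∧ depth' = 0 ∧ dollar = false then
      (parts ++ [PySem.Chars.strip current], [], depth', dollar, escape)
    else (parts, current ++ [c], depth', dollar, escape)

def split_options (s : String) : List String :=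
  let cs := if PySem.Chars.startswith s.toList ['['] && PySem.Chars.endswith s.toList [']']
            then PySem.List.slice s.toList (some 1) (some (-1)) else s.toList
  let r := cs.foldl pvAStep ([], [], 0, false, false)
  (if r.2.1 = [] then r.1 else r.1 ++ [PySem.Chars.strip r.2.1]).map String.ofList

-- ===== PORT B =====
-- B pass 1 state: (cuts, depth, in_dollar, escape); folded over enumerate(s)
def pvBScan (st : List Int × Int × Bool × Bool) (p : Int × Char) : List Int × Int × Bool × Bool :=
  let cuts := st.1; let depth := st.2.1; let dollar := st.2.2.1; let escape := st.2.2.2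
  let c := p.2
  if escape then (cuts, depth, dollar, false)
  else if c = '\\' then (cuts, depth, dollar, true)
  else if c = '$' then (cuts, depth, !dollar, escape)
  else if !dollar then
    if c = '{' then (cuts, depth + 1, dollar, escape)
    else if c = '}' then (cuts, depth - 1, dollar, escape)
    else if c = ',' ∧ depth = 0 then (cuts ++ [p.1], depth, dollar, escape)
    else st
  else st

-- B pass 2 step: slice between consecutive cuts (state: (parts, start))
def pvBCut (cs : List Char) (acc : List (List Char) × Int) (i : Int) : List (List Char) × Int :=
  (acc.1 ++ [PySem.Chars.strip (PySem.List.slice cs (some acc.2) (some i))], i + 1)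

def split_options_alt (s : String) : List String :=
  let cs := if PySem.Chars.startswith s.toList ['['] && PySem.Chars.endswith s.toList [']']
            then PySem.List.slice s.toList (some 1) (some (-1)) else s.toList
  let cuts := ((PySem.List.enumerate cs 0).foldl pvBScan ([], 0, false, false)).1
  let pr := cuts.foldl (pvBCut cs) ([], 0)
  let tail := PySem.List.slice cs (some pr.2) none
  (if tail = [] then pr.1 else pr.1 ++ [PySem.Chars.strip tail]).map String.ofList

-- ===== PRECONDITION & SPEC =====
def Spec_split_options (s : String) (out : List String) : Prop := out = split_options_alt s
instance (s : String) (out : List String) : Decidable (Spec_split_options s out) := by unfold Spec_split_options; infer_instance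

-- ===== CLAIM (what is proved, stated in full; the proofs are below) =====
def Claim_equal_split_options : Prop := ∀ (s : String), Dom_split_options s → Spec_split_options s (split_options s)

-- ===== LEMMAS AND PROOFS =====

-- invariant: continuing A's fold over `rest` (current = cs[s0:|taken|]) agrees with
-- B's two passes continued from cuts (which pass 2 maps to (parts, s0))
def PvInv (rest : List Char) : Prop :=
  ∀ (taken : List Char) (s0 : Nat) (depth : Int) (dollar escape : Bool)
    (cuts : List Int) (parts : List (List Char)),
    s0 ≤ taken.length →
    (cuts.foldl (pvBCut (taken ++ rest)) ([], 0)) = (parts, (s0 : Int)) →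
    (let cs := taken ++ rest
     let ra := rest.foldl pvAStep (parts, ((cs.drop s0).take (taken.length - s0), depth, dollar, escape))
     let cuts' := ((PySem.List.enumerate rest (taken.length : Int)).foldl pvBScan (cuts, depth, dollar, escape)).1
     let pr := cuts'.foldl (pvBCut cs) ([], 0)
     let tail := PySem.List.slice cs (some pr.2) none
     (if ra.2.1 = [] then ra.1 else ra.1 ++ [PySem.Chars.strip ra.2.1]) =
       (if tail = [] then pr.1 else pr.1 ++ [PySem.Chars.strip tail]))

-- a step that only appends the char to `current` (any updated flags/depth)
theorem pv_app (c : Char) (rest : List Char) (ih : PvInv rest) (taken : List Char) (s0 : Nat)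
    (d' : Int) (dol' esc' : Bool) (cuts : List Int) (parts : List (List Char))
    (hs0 : s0 ≤ taken.length)
    (hfold : cuts.foldl (pvBCut (taken ++ c :: rest)) ([], 0) = (parts, (s0 : Int))) :
    (let cs := taken ++ c :: rest
     let ra := rest.foldl pvAStep (parts, ((cs.drop s0).take (taken.length - s0) ++ [c], d', dol', esc'))
     let cuts' := ((PySem.List.enumerate rest ((taken.length : Int) + 1)).foldl pvBScan (cuts, d', dol', esc')).1
     let pr := cuts'.foldl (pvBCut cs) ([], 0)
     let tail := PySem.List.slice cs (some pr.2) none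
     (if ra.2.1 = [] then ra.1 else ra.1 ++ [PySem.Chars.strip ra.2.1]) =
       (if tail = [] then pr.1 else pr.1 ++ [PySem.Chars.strip tail])) := by
  have h := ih (taken ++ [c]) s0 d' dol' esc' cuts parts (by simp; omega)
    (by simpa [List.append_assoc] using hfold)
  have hcur : ((taken ++ c :: rest).drop s0).take (taken.length + 1 - s0)
      = ((taken ++ c :: rest).drop s0).take (taken.length - s0) ++ [c] := by
    rw [List.drop_append_of_le_length hs0]
    have e2 : taken.length - s0 = (taken.drop s0).length := by simp
    have e1 : taken.length + 1 - s0 = (taken.drop s0).length + 1 := by simp; omega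
    rw [e1, e2, List.take_length_add_append, List.take_left]
    simp
  simp only [List.append_assoc, List.singleton_append, List.length_append, List.length_cons,
    List.length_nil, Nat.zero_add, Nat.cast_add, Nat.cast_one, hcur] at h
  exact h

-- the splitting step: A closes `current`, B records the cut index
theorem pv_comma (c : Char) (rest : List Char) (ih : PvInv rest) (taken : List Char) (s0 : Nat)
    (d' : Int) (dol' esc' : Bool) (cuts : List Int) (parts : List (List Char))
    (hs0 : s0 ≤ taken.length)
    (hfold : cuts.foldl (pvBCut (taken ++ c :: rest)) ([], 0) = (parts, (s0 : Int))) :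
    (let cs := taken ++ c :: rest
     let ra := rest.foldl pvAStep
       (parts ++ [PySem.Chars.strip ((cs.drop s0).take (taken.length - s0))], ([], d', dol', esc'))
     let cuts' := ((PySem.List.enumerate rest ((taken.length : Int) + 1)).foldl pvBScan
       (cuts ++ [(taken.length : Int)], d', dol', esc')).1
     let pr := cuts'.foldl (pvBCut cs) ([], 0)
     let tail := PySem.List.slice cs (some pr.2) none
     (if ra.2.1 = [] then ra.1 else ra.1 ++ [PySem.Chars.strip ra.2.1]) =
       (if tail = [] then pr.1 else pr.1 ++ [PySem.Chars.strip tail])) := by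
  have hfold' : (cuts ++ [(taken.length : Int)]).foldl (pvBCut ((taken ++ [c]) ++ rest)) ([], 0)
      = (parts ++ [PySem.Chars.strip (((taken ++ c :: rest).drop s0).take (taken.length - s0))],
         ((taken.length + 1 : Nat) : Int)) := by
    rw [List.foldl_concat, List.append_assoc, List.singleton_append, hfold]
    simp [pvBCut, PySem.List.slice_natCast]
  have h := ih (taken ++ [c]) (taken.length + 1) d' dol' esc'
    (cuts ++ [(taken.length : Int)])
    (parts ++ [PySem.Chars.strip (((taken ++ c :: rest).drop s0).take (taken.length - s0))])
    (by simp) hfold'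
  simp only [List.append_assoc, List.singleton_append, List.length_append, List.length_cons,
    List.length_nil, Nat.zero_add, Nat.cast_add, Nat.cast_one, Nat.sub_self,
    List.take_zero] at h
  exact h

theorem pv_main (rest : List Char) : PvInv rest := by
  induction rest with
  | nil =>
    intro taken s0 depth dollar escape cuts parts hs0 hfold
    rw [List.append_nil] at hfold
    dsimp only
    simp only [PySem.List.enumerate_nil, List.foldl_nil, List.append_nil, hfold]
    rw [PySem.List.slice_from_natCast]
    rw [List.take_of_length_le (by simp)]
  | cons c rest ih =>
    intro taken s0 depth dollar escape cuts parts hs0 hfold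
    dsimp only
    simp only [PySem.List.enumerate_cons, List.foldl_cons]
    dsimp only [pvAStep, pvBScan]
    by_cases he : escape = true
    · subst he
      simpa using pv_app c rest ih taken s0 depth dollar false cuts parts hs0 hfold
    have he' : escape = false := by revert he; cases escape <;> simp
    subst he'
    by_cases hb : c = '\\'
    · subst hb
      simpa using pv_app '\\' rest ih taken s0 depth dollar true cuts parts hs0 hfold
    by_cases hd : c = '$'
    · subst hd
      simpa [hb] using pv_app '$' rest ih taken s0 depth (!dollar) false cuts parts hs0 hfold
    by_cases hdl : dollar = true
    · subst hdl
      simpa [hb, hd] using pv_app c rest ih taken s0 depth true false cuts parts hs0 hfold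
    have hdl' : dollar = false := by revert hdl; cases dollar <;> simp
    subst hdl'
    by_cases h1 : c = '{'
    · subst h1
      simpa using pv_app '{' rest ih taken s0 (depth + 1) false false cuts parts hs0 hfold
    by_cases h2 : c = '}'
    · subst h2
      simpa [h1] using pv_app '}' rest ih taken s0 (depth - 1) false false cuts parts hs0 hfold
    by_cases h3 : c = ','
    · subst h3
      by_cases h4 : depth = 0
      · subst h4
        simpa [h1, h2] using pv_comma ',' rest ih taken s0 0 false false cuts parts hs0 hfold
      · simpa [h1, h2, h4] using pv_app ',' rest ih taken s0 depth false false cuts parts hs0 hfold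
    · simpa [hb, hd, h1, h2, h3] using pv_app c rest ih taken s0 depth false false cuts parts hs0 hfold

-- ===== VERDICT (by name: the statement is the Claim_ definition above) =====
theorem split_options_spec : Claim_equal_split_options := by
  intro s _
  unfold Spec_split_options split_options split_options_alt
  have h := pv_main (if PySem.Chars.startswith s.toList ['['] && PySem.Chars.endswith s.toList [']']
            then PySem.List.slice s.toList (some 1) (some (-1)) else s.toList) [] 0 0 false false [] []
    (by simp) (by simp [List.foldl])
  simp only [List.nil_append, List.length_nil, Nat.cast_zero, List.drop_zero, Nat.sub_zero,
    List.take_zero] at h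
  dsimp only
  rw [h]
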